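-- pv_equiv track=rewrite | github.com/myshkins/grind | python/easy/easy_remove_digit.py | solution
-- ===== SOURCE A (Python) =====
-- def solution(s: str, t:str):
--     result = 0
--     slist = [c for c in s]
--     tlist = [c for c in t]
--     for c, v in enumerate(slist):
--         if v.isdigit():
--             temp = slist[:c] + slist[c + 1:]
--             temp_str = "".join(temp)
--             if temp_str < t:
--                 result += 1
--     for c, v in enumerate(tlist):
--         if v.isdigit():
--             temp = tlist[:c] + tlist[c + 1:]
--             temp_str = "".join(temp)
--             if temp_str > s:
--                 result += 1
--     return result
-- ===== SOURCE B (Python) =====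
-- def _removal_cmps(a, b):
--     # for each index i of a: comparison (-1/0/1) of a-with-a[i]-removed against b,
--     # derived in O(1) each from a prefix-mismatch point and a backward pass of
--     # shifted-suffix comparisons.
--     n, m = len(a), len(b)
--     p = 0
--     while p < n and p < m and a[p] == b[p]:
--         p += 1
--     # T[i] = cmp(a[i+1:], b[i:]), computed back to front
--     T = [0] * (n + 1)
--     T[n] = -1 if n < m else 0
--     for i in range(n - 1, -1, -1):
--         if i >= m:
--             T[i] = 0 if i + 1 >= n else 1
--         elif i + 1 >= n:
--             T[i] = -1
--         elif a[i + 1] < b[i]: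
--             T[i] = -1
--         elif a[i + 1] > b[i]:
--             T[i] = 1
--         else:
--             T[i] = T[i + 1]
--     res = []
--     for i in range(n):
--         if i <= p:
--             res.append(T[i])
--         elif p < m:
--             res.append(-1 if a[p] < b[p] else 1)
--         else:
--             res.append(1)
--     return res
--
--
-- def solution(s: str, t: str):
--     cs = _removal_cmps(s, t)
--     ct = _removal_cmps(t, s)
--     return sum(1 for i, ch in enumerate(s) if ch.isdigit() and cs[i] == -1) \
--          + sum(1 for i, ch in enumerate(t) if ch.isdigit() and ct[i] == 1)
-- ===== Notes on version B (the rewrite author's own statement) =====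
-- stated objective: alternative
-- what changed: A rebuilds and lexicographically compares a full copy of the string for every digit position; B instead precomputes the first prefix-mismatch point plus one backward pass of shifted-suffix comparisons and reads each removal's comparison off that table in O(1) (worst-case O(n+m) vs A's O(n*(n+m)), but A's C-level slice/compare wins on the wall clock for the generated inputs, so no speed is claimed).
import Mathlib
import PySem

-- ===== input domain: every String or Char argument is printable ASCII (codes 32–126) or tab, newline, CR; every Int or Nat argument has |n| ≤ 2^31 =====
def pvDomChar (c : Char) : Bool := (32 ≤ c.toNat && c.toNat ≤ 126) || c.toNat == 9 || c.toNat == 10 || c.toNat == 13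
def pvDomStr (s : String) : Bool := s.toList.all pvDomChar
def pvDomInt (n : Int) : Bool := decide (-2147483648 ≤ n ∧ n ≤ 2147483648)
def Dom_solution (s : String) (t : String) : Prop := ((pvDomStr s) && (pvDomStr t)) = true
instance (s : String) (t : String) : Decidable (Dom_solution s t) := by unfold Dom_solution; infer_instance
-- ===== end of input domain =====

-- B uses a different algorithm: instead of rebuilding and comparing a copy of the string per digit
-- position (A), it derives each removal's comparison from one prefix-mismatch point plus a backward
-- pass of shifted-suffix comparisons (objective: alternative; no wall-clock speed is claimed).

-- ===== PORT A =====
-- A: for every digit position of s, delete it and test the result < t; symmetrically for t with > s.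
-- "".join(temp) < t is code-point lexicographic comparison = '<' on List Char (PySem str COMPARISON).
def solution (s : String) (t : String) : Int :=
  let slist := s.toList
  let tlist := t.toList
  let result : Int := 0
  let result := (PySem.List.enumerate slist 0).foldl (fun result cv =>
    if PySem.Chars.isdigit cv.2 then
      let temp := PySem.List.slice slist none (some cv.1) ++ PySem.List.slice slist (some (cv.1 + 1)) none
      if temp < tlist then result + 1 else result
    else result) result
  (PySem.List.enumerate tlist 0).foldl (fun result cv =>
    if PySem.Chars.isdigit cv.2 then
      let temp := PySem.List.slice tlist none (some cv.1) ++ PySem.List.slice tlist (some (cv.1 + 1)) none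
      if slist < temp then result + 1 else result
    else result) result

-- ===== PORT B =====
-- length of the common prefix of a and b (Source B's while loop advancing p)
def prefLen : List Char → List Char → Nat
  | x :: xs, y :: ys => if x = y then prefLen xs ys + 1 else 0
  | _, _ => 0

-- Source B's backward loop filling T: tFrom a b i = [T i, T (i+1), …, T n], T i = cmp(a[i+1:], b[i:])
def tFrom (a b : List Char) (i : Nat) : List Int :=
  if a.length ≤ i then [if a.length < b.length then -1 else 0]
  else
    let rest := tFrom a b (i + 1)
    let ti : Int :=
      if b.length ≤ i then (if a.length ≤ i + 1 then 0 else 1)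
      else if a.length ≤ i + 1 then -1
      else if a.getD (i + 1) ' ' < b.getD i ' ' then -1
      else if b.getD i ' ' < a.getD (i + 1) ' ' then 1
      else rest.headD 0
    ti :: rest
  termination_by a.length + 1 - i

-- Source B's _removal_cmps
def removalCmps (a b : List Char) : List Int :=
  let n := a.length
  let m := b.length
  let p := prefLen a b
  let T := tFrom a b 0
  (List.range n).map (fun i =>
    if i ≤ p then T.getD i 0
    else if p < m then (if a.getD p ' ' < b.getD p ' ' then -1 else 1)
    else 1)

def solution_alt (s : String) (t : String) : Int :=
  let sl := s.toList
  let tl := t.toList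
  let cs := removalCmps sl tl
  let ct := removalCmps tl sl
  ((PySem.List.enumerate sl 0).foldl (fun r cv =>
      if PySem.Chars.isdigit cv.2 && (PySem.List.pyGetD cs cv.1 0 == -1) then r + 1 else r) 0)
  + ((PySem.List.enumerate tl 0).foldl (fun r cv =>
      if PySem.Chars.isdigit cv.2 && (PySem.List.pyGetD ct cv.1 0 == 1) then r + 1 else r) 0)

-- ===== PRECONDITION & SPEC =====
def Spec_solution (s : String) (t : String) (out : Int) : Prop := out = solution_alt s t
instance (s : String) (t : String) (out : Int) : Decidable (Spec_solution s t out) := by unfold Spec_solution; infer_instance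

-- ===== CLAIM (what is proved, stated in full; the proofs are below) =====
def Claim_equal_solution : Prop := ∀ (s : String) (t : String), Dom_solution s t → Spec_solution s t (solution s t)

-- ===== LEMMAS AND PROOFS =====

-- three-way lexicographic comparison, the mathematical yardstick both ports are reduced to
def cmp3 : List Char → List Char → Int
  | [], [] => 0
  | [], _ :: _ => -1
  | _ :: _, [] => 1
  | x :: xs, y :: ys => if x < y then -1 else if y < x then 1 else cmp3 xs ys

theorem cmp3_neg_iff (x y : List Char) : cmp3 x y = -1 ↔ x < y := by
  induction x generalizing y with
  | nil => cases y with
    | nil => simp [cmp3]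
    | cons b ys => simp [cmp3, List.nil_lt_cons]
  | cons a xs ih => cases y with
    | nil => simp [cmp3, List.not_lt_nil]
    | cons b ys =>
      simp only [cmp3, List.cons_lt_cons_iff]
      split_ifs with h1 h2
      · simp [h1]
      · constructor
        · intro h; exact absurd h (by decide)
        · rintro (h | ⟨rfl, _⟩) <;> [exact absurd h h1; exact absurd h2 (lt_irrefl _)]
      · have hab : a = b := le_antisymm (not_lt.1 h2) (not_lt.1 h1)
        simp [hab, ih]

theorem cmp3_swap (x y : List Char) : cmp3 y x = -cmp3 x y := by
  induction x generalizing y with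
  | nil => cases y <;> simp [cmp3]
  | cons a xs ih => cases y with
    | nil => simp [cmp3]
    | cons b ys =>
      simp only [cmp3]
      rcases lt_trichotomy a b with h | h | h
      · simp [h, not_lt.2 h.le]
      · simp [h, ih]
      · simp [h, not_lt.2 h.le]

theorem cmp3_pos_iff (x y : List Char) : cmp3 x y = 1 ↔ y < x := by
  rw [← cmp3_neg_iff y x, cmp3_swap x y]; omega

theorem cmp3_append_left (c u v : List Char) : cmp3 (c ++ u) (c ++ v) = cmp3 u v := by
  induction c with
  | nil => rfl
  | cons a cs ih => simp [cmp3, ih]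

theorem prefLen_le_right (a b : List Char) : prefLen a b ≤ b.length := by
  induction a generalizing b with
  | nil => simp [prefLen]
  | cons x xs ih => cases b with
    | nil => simp [prefLen]
    | cons y ys => simp only [prefLen]; split_ifs <;> simp [ih]

theorem take_prefLen (a b : List Char) : a.take (prefLen a b) = b.take (prefLen a b) := by
  induction a generalizing b with
  | nil => simp [prefLen]
  | cons x xs ih => cases b with
    | nil => simp [prefLen]
    | cons y ys =>
      simp only [prefLen]
      split_ifs with h
      · simp [h, ih]
      · simp

theorem prefLen_mismatch (a b : List Char) (h1 : prefLen a b < a.length) (h2 : prefLen a b < b.length) (d : Char) :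
    a.getD (prefLen a b) d ≠ b.getD (prefLen a b) d := by
  induction a generalizing b with
  | nil => simp at h1
  | cons x xs ih => cases b with
    | nil => simp at h2
    | cons y ys =>
      simp only [prefLen] at *
      split_ifs at * with h
      · simpa using ih ys (by simpa using h1) (by simpa using h2) 
      · simpa using h

theorem cmp3_nil_left (y : List Char) : cmp3 [] y = if y.isEmpty then 0 else -1 := by
  cases y <;> rfl

theorem cmp3_nil_right (x : List Char) : cmp3 x [] = if x.isEmpty then 0 else 1 := by
  cases x <;> rfl

theorem drop_isEmpty (l : List Char) (j : Nat) : (l.drop j).isEmpty = decide (l.length ≤ j) := by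
  by_cases h : l.length ≤ j
  · rw [List.drop_eq_nil_of_le h]; simp [h]
  · cases hdd : l.drop j with
    | nil =>
      exfalso
      have := congrArg List.length hdd
      simp at this
      omega
    | cons c cs => simp [h]

theorem tFrom_eq (a b : List Char) : ∀ i, i ≤ a.length →
    tFrom a b i = (List.range (a.length + 1 - i)).map (fun k => cmp3 (a.drop (i + k + 1)) (b.drop (i + k))) := by
  suffices H : ∀ d i, a.length - i = d → i ≤ a.length →
      tFrom a b i = (List.range (a.length + 1 - i)).map (fun k => cmp3 (a.drop (i + k + 1)) (b.drop (i + k))) by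
    exact fun i hi => H _ i rfl hi
  intro d
  induction d with
  | zero =>
    intro i hd hi
    have hin : i = a.length := by omega
    subst hin
    rw [tFrom, if_pos le_rfl]
    have h1 : a.length + 1 - a.length = 1 := by omega
    rw [h1]
    simp only [List.range_one, List.map_cons, List.map_nil]
    have h2 : a.drop (a.length + 0 + 1) = [] := List.drop_eq_nil_of_le (by omega)
    rw [h2, cmp3_nil_left, drop_isEmpty]
    by_cases h : b.length ≤ a.length
    · simp [h, Nat.not_lt.2 h]
    · simp [h, Nat.lt_of_not_le h]
  | succ d ih =>
    intro i hd hi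
    have hlt : i < a.length := by omega
    rw [tFrom, if_neg (by omega)]
    have hrest := ih (i + 1) (by omega) (by omega)
    have hlen1 : a.length + 1 - (i + 1) = a.length - i := by omega
    rw [hlen1] at hrest
    simp only [hrest]
    have hr : a.length + 1 - i = (a.length - i) + 1 := by omega
    rw [hr, List.range_succ_eq_map]
    simp only [List.map_cons, List.map_map]
    have htail : ∀ k : Nat, cmp3 (a.drop (i + 1 + k + 1)) (b.drop (i + 1 + k))
        = cmp3 (a.drop (i + (k + 1) + 1)) (b.drop (i + (k + 1))) := by
      intro k
      have e1 : i + 1 + k + 1 = i + (k + 1) + 1 := by omega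
      have e2 : i + 1 + k = i + (k + 1) := by omega
      rw [e1, e2]
    have hhead : (if b.length ≤ i then (if a.length ≤ i + 1 then (0:Int) else 1)
      else if a.length ≤ i + 1 then -1
      else if a.getD (i + 1) ' ' < b.getD i ' ' then -1
      else if b.getD i ' ' < a.getD (i + 1) ' ' then 1
      else ((List.range (a.length - i)).map (fun k => cmp3 (a.drop (i + 1 + k + 1)) (b.drop (i + 1 + k)))).headD 0)
        = cmp3 (a.drop (i + 0 + 1)) (b.drop (i + 0)) := by
      by_cases hm : b.length ≤ i
      · rw [if_pos hm]
        have hb : b.drop (i + 0) = [] := List.drop_eq_nil_of_le (by omega)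
        rw [hb, cmp3_nil_right, drop_isEmpty]
        by_cases h : a.length ≤ i + 1
        · simp [h]
        · simp [h]
      · rw [if_neg hm]
        have hbi : i < b.length := by omega
        have hbd : b.drop (i + 0) = b[i] :: b.drop (i + 1) := by
          exact List.drop_eq_getElem_cons hbi
        by_cases hn : a.length ≤ i + 1
        · rw [if_pos hn]
          have ha : a.drop (i + 0 + 1) = [] := List.drop_eq_nil_of_le (by omega)
          rw [ha, hbd, cmp3_nil_left]
          simp only [List.isEmpty_cons]
          norm_num
        · rw [if_neg hn]
          have hai : i + 1 < a.length := by omega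
          have had : a.drop (i + 0 + 1) = a[i+1] :: a.drop (i + 2) := by
            exact List.drop_eq_getElem_cons hai
          have hga : a.getD (i + 1) ' ' = a[i+1] := List.getD_eq_getElem a ' ' hai
          have hgb : b.getD i ' ' = b[i] := List.getD_eq_getElem b ' ' hbi
          rw [had, hbd, hga, hgb]
          simp only [cmp3]
          by_cases h1 : a[i+1] < b[i]
          · rw [if_pos h1, if_pos h1]
          · rw [if_neg h1, if_neg h1]
            by_cases h2 : b[i] < a[i+1]
            · rw [if_pos h2, if_pos h2]
            · rw [if_neg h2, if_neg h2]
              have hne : a.length - i = (a.length - i - 1) + 1 := by omega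
              rw [hne, List.range_succ_eq_map]
              simp only [List.map_cons, List.headD_cons]
    rw [hhead]
    congr 1
    apply List.map_congr_left
    intro k _
    simp only [Function.comp]
    exact htail k

theorem removalCmps_getD (a b : List Char) (i : Nat) (hi : i < a.length) :
    (removalCmps a b).getD i 0 = cmp3 (a.take i ++ a.drop (i + 1)) b := by
  have hmap : (removalCmps a b).getD i 0 =
      (if i ≤ prefLen a b then (tFrom a b 0).getD i 0
       else if prefLen a b < b.length then (if a.getD (prefLen a b) ' ' < b.getD (prefLen a b) ' ' then -1 else 1)
       else 1) := by
    unfold removalCmps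
    rw [List.getD_eq_getElem _ 0 (by simpa using hi)]
    simp
  rw [hmap]
  by_cases hip : i ≤ prefLen a b
  · rw [if_pos hip]
    have hT := tFrom_eq a b 0 (Nat.zero_le _)
    rw [hT, List.getD_eq_getElem _ 0 (by simp; omega)]
    simp only [List.getElem_map, List.getElem_range, Nat.zero_add]
    have him : i ≤ b.length := le_trans hip (prefLen_le_right a b)
    have htk : a.take i = b.take i := by
      have h1 : a.take i = (a.take (prefLen a b)).take i := by
        rw [List.take_take, Nat.min_eq_left hip]
      rw [h1, take_prefLen, List.take_take, Nat.min_eq_left hip]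
    conv_rhs => rw [← List.take_append_drop i b, ← htk, cmp3_append_left]
  · rw [if_neg hip]
    have hpi : prefLen a b < i := by omega
    have hpn : prefLen a b < a.length := by omega
    have hsplit : a.take i ++ a.drop (i + 1) =
        a.take (prefLen a b) ++ (a[prefLen a b]'hpn ::
          ((a.drop (prefLen a b + 1)).take (i - prefLen a b - 1) ++ a.drop (i + 1))) := by
      have h1 : a.take i = a.take (prefLen a b) ++ (a.drop (prefLen a b)).take (i - prefLen a b) := by
        conv_lhs => rw [show i = prefLen a b + (i - prefLen a b) from by omega]
        rw [List.take_add]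
      have h2 : a.drop (prefLen a b) = a[prefLen a b]'hpn :: a.drop (prefLen a b + 1) :=
        List.drop_eq_getElem_cons hpn
      have h3 : i - prefLen a b = (i - prefLen a b - 1) + 1 := by omega
      conv_lhs => rw [h1, h2, h3, List.take_succ_cons]
      rw [List.append_assoc, List.cons_append]
    by_cases hpm : prefLen a b < b.length
    · rw [if_pos hpm]
      have hbsplit : b = b.take (prefLen a b) ++ (b[prefLen a b]'hpm :: b.drop (prefLen a b + 1)) := by
        conv_lhs => rw [← List.take_append_drop (prefLen a b) b, List.drop_eq_getElem_cons hpm]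
      have hne : a[prefLen a b]'hpn ≠ b[prefLen a b]'hpm := by
        have := prefLen_mismatch a b hpn hpm ' '
        rwa [List.getD_eq_getElem a ' ' hpn, List.getD_eq_getElem b ' ' hpm] at this
      rw [hsplit, take_prefLen a b]
      have h5 := congrArg (cmp3 (List.take (prefLen a b) b ++ a[prefLen a b]'hpn ::
        (List.take (i - prefLen a b - 1) (List.drop (prefLen a b + 1) a) ++ List.drop (i + 1) a))) hbsplit
      rw [h5, cmp3_append_left]
      simp only [cmp3]
      rw [List.getD_eq_getElem a ' ' hpn, List.getD_eq_getElem b ' ' hpm]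
      by_cases h1 : a[prefLen a b]'hpn < b[prefLen a b]'hpm
      · rw [if_pos h1, if_pos h1]
      · rw [if_neg h1, if_neg h1, if_pos (lt_of_le_of_ne (not_lt.mp h1) hne.symm)]
    · rw [if_neg hpm]
      have hb : b = a.take (prefLen a b) ++ [] := by
        rw [List.append_nil, take_prefLen]
        rw [le_antisymm (prefLen_le_right a b) (by omega), List.take_length]
      rw [hsplit]
      have h5 := congrArg (cmp3 (List.take (prefLen a b) a ++ a[prefLen a b]'hpn ::
        (List.take (i - prefLen a b - 1) (List.drop (prefLen a b + 1) a) ++ List.drop (i + 1) a))) hb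
      rw [h5]
      have h6 := cmp3_append_left (List.take (prefLen a b) a) (a[prefLen a b]'hpn ::
        (List.take (i - prefLen a b - 1) (List.drop (prefLen a b + 1) a) ++ List.drop (i + 1) a)) []
      rw [h6]
      rfl

-- one side of the count: A's remove-and-compare test agrees with B's stored comparison
theorem side_eq (a b : List Char) (want : Int) (cond : List Char → Prop) [inst : ∀ x, Decidable (cond x)]
    (hcond : ∀ x, cmp3 x b = want ↔ cond x) :
    ((PySem.List.enumerate a 0).countP (fun cv => PySem.Chars.isdigit cv.2 &&
        decide (cond (PySem.List.slice a none (some cv.1) ++ PySem.List.slice a (some (cv.1 + 1)) none))))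
    = ((PySem.List.enumerate a 0).countP (fun cv => PySem.Chars.isdigit cv.2 &&
        (PySem.List.pyGetD (removalCmps a b) cv.1 0 == want))) := by
  apply List.countP_congr
  intro cv hcv
  obtain ⟨k, hk, rfl⟩ := (PySem.List.mem_enumerate_iff a 0 cv).1 hcv
  simp only [zero_add]
  have e1 : ((k : Int) + 1) = ((k + 1 : Nat) : Int) := by push_cast; ring
  rw [e1, PySem.List.slice_to_natCast, PySem.List.slice_from_natCast, PySem.List.pyGetD_natCast,
    removalCmps_getD a b k hk]
  by_cases h : cond (a.take k ++ a.drop (k + 1))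
  · simp [h, (hcond _).2 h]
  · have : cmp3 (a.take k ++ a.drop (k + 1)) b ≠ want := fun hc => h ((hcond _).1 hc)
    simp [h, this]

theorem solution_spec : Claim_equal_solution := by
  intro s t _
  unfold Spec_solution solution solution_alt
  simp only []
  have hbody : ∀ (a b : List Char), (fun (result : Int) (cv : Int × Char) =>
      if PySem.Chars.isdigit cv.2 then
        if (PySem.List.slice a none (some cv.1) ++ PySem.List.slice a (some (cv.1 + 1)) none) < b
          then result + 1 else result
      else result)
    = (fun (result : Int) (cv : Int × Char) =>
      if PySem.Chars.isdigit cv.2 &&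
          decide ((PySem.List.slice a none (some cv.1) ++ PySem.List.slice a (some (cv.1 + 1)) none) < b)
        then result + 1 else result) := by
    intro a b
    funext r cv
    by_cases h1 : PySem.Chars.isdigit cv.2 <;>
      by_cases h2 : (PySem.List.slice a none (some cv.1) ++ PySem.List.slice a (some (cv.1 + 1)) none) < b <;>
      simp [h1, h2]
  have hbody2 : ∀ (a b : List Char), (fun (result : Int) (cv : Int × Char) =>
      if PySem.Chars.isdigit cv.2 then
        if b < (PySem.List.slice a none (some cv.1) ++ PySem.List.slice a (some (cv.1 + 1)) none)
          then result + 1 else result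
      else result)
    = (fun (result : Int) (cv : Int × Char) =>
      if PySem.Chars.isdigit cv.2 &&
          decide (b < (PySem.List.slice a none (some cv.1) ++ PySem.List.slice a (some (cv.1 + 1)) none))
        then result + 1 else result) := by
    intro a b
    funext r cv
    by_cases h1 : PySem.Chars.isdigit cv.2 <;>
      by_cases h2 : b < (PySem.List.slice a none (some cv.1) ++ PySem.List.slice a (some (cv.1 + 1)) none) <;>
      simp [h1, h2]
  rw [hbody s.toList t.toList, hbody2 t.toList s.toList,
    PySem.List.foldl_count_if, PySem.List.foldl_count_if, PySem.List.foldl_count_if,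
    PySem.List.foldl_count_if,
    side_eq s.toList t.toList (-1) (fun x => x < t.toList) (fun x => cmp3_neg_iff x t.toList),
    side_eq t.toList s.toList 1 (fun x => s.toList < x) (fun x => cmp3_pos_iff x s.toList)]
  ring
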